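-- pv_equiv track=rewrite | github.com/taechanha/PS | leetcode/c++vsjava.py | is_cpp_or_java
-- ===== SOURCE A (Python) =====
-- def is_cpp_or_java(string):
--     cpp, java = False, False
--     for ch in string:
--         if ch == '_':  # c++
--             cpp = True
--             return True, True
--         elif ch.isupper():  # java
--             java = True
--             return True, False
--     if not cpp and not java:
--         return False, None
-- ===== SOURCE B (Python) =====
-- def is_cpp_or_java(string):
--     u = next((i for i, ch in enumerate(string) if ch == '_'), -1)
--     c = next((i for i, ch in enumerate(string) if ch.isupper()), -1)
--     if u < 0 and c < 0:
--         return False, None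
--     if c < 0:
--         return True, True
--     if u < 0:
--         return True, False
--     return True, u < c
-- ===== Notes on version B (the rewrite author's own statement) =====
-- stated objective: alternative
-- what changed: Replaces A's single early-exit scan with two independent first-occurrence searches (first '_' and first uppercase char) followed by a sentinel-aware comparison of the two positions.
import Mathlib
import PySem

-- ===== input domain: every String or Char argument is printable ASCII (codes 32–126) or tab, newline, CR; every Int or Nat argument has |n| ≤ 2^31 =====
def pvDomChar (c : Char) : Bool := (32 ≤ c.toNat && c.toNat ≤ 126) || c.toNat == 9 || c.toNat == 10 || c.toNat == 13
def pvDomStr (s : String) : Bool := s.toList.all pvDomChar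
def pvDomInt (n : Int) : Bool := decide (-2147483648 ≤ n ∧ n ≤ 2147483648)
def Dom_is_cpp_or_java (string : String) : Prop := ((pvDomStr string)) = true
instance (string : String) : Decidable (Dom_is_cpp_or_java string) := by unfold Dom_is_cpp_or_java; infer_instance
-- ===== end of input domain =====

-- B replaces A's single early-exit scan with two first-occurrence searches plus a position comparison (alternative decomposition, same cost).


-- ===== PORT A =====
-- A's for-loop with early returns, as structural recursion over the characters.
def isCppOrJavaLoop : List Char → Bool × Option Bool
  | [] => (false, none)
  | ch :: rest =>
    if ch = '_' then (true, some true)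
    else if PySem.Chars.isupper ch then (true, some false)
    else isCppOrJavaLoop rest

def is_cpp_or_java (string : String) : Bool × Option Bool :=
  isCppOrJavaLoop string.toList

-- ===== PORT B =====
-- next((i for i, ch in enumerate(string) if p ch), -1): index-carrying scan, -1 if absent.
def firstIdx (p : Char → Bool) (i : Int) : List Char → Int
  | [] => -1
  | ch :: rest => if p ch then i else firstIdx p (i + 1) rest

def is_cpp_or_java_alt (string : String) : Bool × Option Bool :=
  let u := firstIdx (fun ch => ch = '_') 0 string.toList
  let c := firstIdx (fun ch => PySem.Chars.isupper ch) 0 string.toList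
  if u < 0 ∧ c < 0 then (false, none)
  else if c < 0 then (true, some true)
  else if u < 0 then (true, some false)
  else (true, some (decide (u < c)))

-- ===== PRECONDITION & SPEC =====
def Spec_is_cpp_or_java (string : String) (out : Bool × Option Bool) : Prop := out = is_cpp_or_java_alt string
instance (string : String) (out : Bool × Option Bool) : Decidable (Spec_is_cpp_or_java string out) := by unfold Spec_is_cpp_or_java; infer_instance

-- ===== CLAIM (what is proved, stated in full; the proofs are below) =====
def Claim_equal_is_cpp_or_java : Prop := ∀ (string : String), Dom_is_cpp_or_java string → Spec_is_cpp_or_java string (is_cpp_or_java string)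

-- ===== LEMMAS AND PROOFS =====

-- Combining step of B, abstracted over the two search results.
def combineIdx (u c : Int) : Bool × Option Bool :=
  if u < 0 ∧ c < 0 then (false, none)
  else if c < 0 then (true, some true)
  else if u < 0 then (true, some false)
  else (true, some (decide (u < c)))

-- firstIdx either fails (-1) or returns a position ≥ the start index.
theorem firstIdx_cases (p : Char → Bool) (l : List Char) (i : Int) :
    firstIdx p i l = -1 ∨ i ≤ firstIdx p i l := by
  induction l generalizing i with
  | nil => left; rfl
  | cons ch rest ih =>
    by_cases h : p ch
    · right; simp [firstIdx, h]
    · rcases ih (i + 1) with h1 | h1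
      · left; simp [firstIdx, h, h1]
      · right; simp only [firstIdx, h]; omega

-- Loop invariant: A's scan equals B's combination of the two searches started at any i ≥ 0.
theorem loop_eq_combine (l : List Char) (i : Int) (hi : 0 ≤ i) :
    isCppOrJavaLoop l =
      combineIdx (firstIdx (fun ch => ch = '_') i l)
                 (firstIdx (fun ch => PySem.Chars.isupper ch) i l) := by
  induction l generalizing i with
  | nil => simp [isCppOrJavaLoop, firstIdx, combineIdx]
  | cons ch rest ih =>
    by_cases hu : ch = '_'
    · have e1 : firstIdx (fun ch => ch = '_') i (ch :: rest) = i := by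
        simp [firstIdx, hu]
      have e2 : firstIdx (fun ch => PySem.Chars.isupper ch) i (ch :: rest)
          = firstIdx (fun ch => PySem.Chars.isupper ch) (i + 1) rest := by
        subst hu
        simp [firstIdx, show PySem.Chars.isupper '_' = false from by decide]
      have eA : isCppOrJavaLoop (ch :: rest) = (true, some true) := by
        simp [isCppOrJavaLoop, hu]
      rw [e1, e2, eA]
      rcases firstIdx_cases (fun ch => PySem.Chars.isupper ch) rest (i + 1) with h1 | h1
      · rw [h1]; simp only [combineIdx]
        rw [if_neg (by omega), if_pos (by omega)]
      · simp only [combineIdx]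
        rw [if_neg (by omega), if_neg (by omega), if_neg (by omega)]
        simp only [Prod.mk.injEq, Option.some.injEq, true_and]
        symm; simp only [decide_eq_true_eq]; omega
    · by_cases hc : PySem.Chars.isupper ch
      · have e1 : firstIdx (fun ch => ch = '_') i (ch :: rest)
            = firstIdx (fun ch => ch = '_') (i + 1) rest := by
          simp [firstIdx, hu]
        have e2 : firstIdx (fun ch => PySem.Chars.isupper ch) i (ch :: rest) = i := by
          simp [firstIdx, hc]
        have eA : isCppOrJavaLoop (ch :: rest) = (true, some false) := by
          simp [isCppOrJavaLoop, hu, hc]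
        rw [e1, e2, eA]
        rcases firstIdx_cases (fun ch => ch = '_') rest (i + 1) with h1 | h1
        · rw [h1]; simp only [combineIdx]
          rw [if_neg (by omega), if_neg (by omega), if_pos (by omega)]
        · simp only [combineIdx]
          rw [if_neg (by omega), if_neg (by omega), if_neg (by omega)]
          simp only [Prod.mk.injEq, Option.some.injEq, true_and]
          symm; simp only [decide_eq_false_iff_not]; omega
      · have e1 : firstIdx (fun ch => ch = '_') i (ch :: rest)
            = firstIdx (fun ch => ch = '_') (i + 1) rest := by
          simp [firstIdx, hu]
        have e2 : firstIdx (fun ch => PySem.Chars.isupper ch) i (ch :: rest)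
            = firstIdx (fun ch => PySem.Chars.isupper ch) (i + 1) rest := by
          simp [firstIdx, hc]
        have eA : isCppOrJavaLoop (ch :: rest) = isCppOrJavaLoop rest := by
          simp [isCppOrJavaLoop, hu, hc]
        rw [e1, e2, eA]
        exact ih (i + 1) (by omega)

-- ===== VERDICT (by name: the statement is the Claim_ definition above) =====
theorem is_cpp_or_java_spec : Claim_equal_is_cpp_or_java := by
  intro s _
  show is_cpp_or_java s = is_cpp_or_java_alt s
  have := loop_eq_combine s.toList 0 (by omega)
  simpa [is_cpp_or_java, is_cpp_or_java_alt, combineIdx] using this
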